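-- pv_equiv track=rewrite | github.com/TheFern2/Code-Wars-Python | Code-Wars-Python-2/Source/StringMix.py | mix2
-- ===== SOURCE A (Python) =====
-- from collections import Counter
--
-- def mix2(s1, s2):
--     c1 = Counter(filter(str.islower, s1))
--     c2 = Counter(filter(str.islower, s2))
--     res = []
--     for c in set(c1 + c2):
--         n1, n2 = c1.get(c, 0), c2.get(c, 0)
--         if n1 > 1 or n2 > 1:
--             res.append(('1', c, n1) if n1 > n2 else
--                        ('2', c, n2) if n2 > n1 else ('=', c, n1))
--     res = ['{}:{}'.format(i, c * n) for i, c, n in res]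
--     return '/'.join(sorted(res, key=lambda s: (-len(s), s)))
-- ===== SOURCE B (Python) =====
-- def mix2(s1, s2):
--     # Sort-and-merge instead of hashing: sort each string's lowercase letters,
--     # then walk both sorted lists in one merge pass, consuming each letter's run
--     # to get its two counts directly.
--     a = sorted(c for c in s1 if c.islower())
--     b = sorted(c for c in s2 if c.islower())
--     entries = []
--     i = j = 0
--     la, lb = len(a), len(b)
--     while i < la or j < lb:
--         if j >= lb or (i < la and a[i] <= b[j]):
--             ch = a[i]
--         else:
--             ch = b[j]
--         n1 = 0
--         while i < la and a[i] == ch: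
--             i += 1
--             n1 += 1
--         n2 = 0
--         while j < lb and b[j] == ch:
--             j += 1
--             n2 += 1
--         if n1 > 1 or n2 > 1:
--             if n1 > n2:
--                 entries.append('1:' + ch * n1)
--             elif n2 > n1:
--                 entries.append('2:' + ch * n2)
--             else:
--                 entries.append('=:' + ch * n1)
--     entries.sort(key=lambda s: (-len(s), s))
--     return '/'.join(entries)
-- ===== Notes on version B (the rewrite author's own statement) =====
-- stated objective: alternative
-- what changed: B replaces A's Counter hash tables by sort-and-merge: it sorts each string's lowercase letters and walks the two sorted lists in a single two-pointer merge pass, reading each letter's two counts off its consecutive runs, instead of building and adding frequency dictionaries and iterating their key set.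
import Mathlib
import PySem

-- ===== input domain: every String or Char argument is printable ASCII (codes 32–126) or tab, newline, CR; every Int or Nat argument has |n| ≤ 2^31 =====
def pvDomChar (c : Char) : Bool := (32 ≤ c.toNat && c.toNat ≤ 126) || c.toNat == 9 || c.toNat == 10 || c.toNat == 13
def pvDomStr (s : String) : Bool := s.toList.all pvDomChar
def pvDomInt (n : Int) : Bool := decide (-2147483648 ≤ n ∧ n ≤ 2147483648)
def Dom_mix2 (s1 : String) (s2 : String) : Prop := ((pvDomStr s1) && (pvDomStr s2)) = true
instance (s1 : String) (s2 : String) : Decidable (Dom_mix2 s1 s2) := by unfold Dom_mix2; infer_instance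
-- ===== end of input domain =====

-- B replaces A's Counter hashing by sort-and-merge: it sorts each string's lowercase letters and
-- walks both sorted lists in one merge pass, reading each letter's two counts off its runs
-- (objective: alternative).

-- ===== PORT A =====
-- '{}:{}'.format(i, c * n) — i is a 1/2/= tag, c * n is the character repeated n times (empty for n ≤ 0)
def pvFmtA (t : List Char × Char × Int) : List Char :=
  t.1 ++ ':' :: List.replicate t.2.2.toNat t.2.1

def mix2 (s1 : String) (s2 : String) : String :=
  let c1 := PySem.Dict.counter (s1.toList.filter PySem.Chars.islower)
  let c2 := PySem.Dict.counter (s2.toList.filter PySem.Chars.islower)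
  -- Counter.__add__ ported by hand: fold c2's items into c1 (every count of both counters is ≥ 1
  -- here, so the positivity filter of Counter.__add__ never drops a key); exact on this use
  let csum := c2.items.foldl (fun d p => d.modify p.1 0 (fun v => v + p.2)) c1
  -- set(c1 + c2) iterates the distinct keys; the final sorted-by-injective-key result does not
  -- depend on the iteration order, so Set.ofList's order is exact for the return value
  let res := (PySem.Set.ofList csum.keys).foldl (fun acc c =>
      let n1 := c1.getD c 0
      let n2 := c2.getD c 0
      if n1 > 1 ∨ n2 > 1 then
        acc ++ [if n1 > n2 then (['1'], c, n1) else if n2 > n1 then (['2'], c, n2)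
                else (['='], c, n1)]
      else acc) []
  let res2 := res.map pvFmtA
  String.ofList (PySem.Chars.join ['/']
    (PySem.List.sorted2 res2 (fun s => -(s.length : Int)) (fun s => s) false))

-- ===== PORT B =====
-- '1:' + ch * n1 / '2:' + ch * n2 / '=:' + ch * n1 , by Source B's if/elif/else
def pvEntryStr (ch : Char) (n1 n2 : Nat) : List Char :=
  if n2 < n1 then '1' :: ':' :: List.replicate n1 ch
  else if n1 < n2 then '2' :: ':' :: List.replicate n2 ch
  else '=' :: ':' :: List.replicate n1 ch

-- the inner 'while i < la and a[i] == ch: i += 1; n += 1' run-consuming loop: returns (run length, rest)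
def pvRun (ch : Char) : List Char → Nat × List Char
  | [] => (0, [])
  | x :: xs => if x = ch then ((pvRun ch xs).1 + 1, (pvRun ch xs).2) else (0, x :: xs)

theorem pvRun_rest_length_le (ch : Char) (l : List Char) : (pvRun ch l).2.length ≤ l.length := by
  induction l with
  | nil => simp [pvRun]
  | cons x xs ih =>
    by_cases h : x = ch <;> simp [pvRun, h]
    omega

theorem pvRun_rest_length_lt_cons (ch : Char) (xs : List Char) :
    (pvRun ch (ch :: xs)).2.length < (ch :: xs).length := by
  have := pvRun_rest_length_le ch xs
  simp [pvRun]; omega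

-- the outer 'while i < la or j < lb' merge loop of Source B over the two sorted lists
def pvMerge (a b : List Char) : List (List Char) :=
  match a, b with
  | [], [] => []
  | x :: a', [] =>
    (if 1 < (pvRun x (x :: a')).1 ∨ 1 < (pvRun x ([] : List Char)).1 then
        [pvEntryStr x (pvRun x (x :: a')).1 (pvRun x ([] : List Char)).1] else []) ++
      pvMerge (pvRun x (x :: a')).2 (pvRun x ([] : List Char)).2
  | [], y :: b' =>
    (if 1 < (pvRun y ([] : List Char)).1 ∨ 1 < (pvRun y (y :: b')).1 then
        [pvEntryStr y (pvRun y ([] : List Char)).1 (pvRun y (y :: b')).1] else []) ++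
      pvMerge (pvRun y ([] : List Char)).2 (pvRun y (y :: b')).2
  | x :: a', y :: b' =>
    (if 1 < (pvRun (if x ≤ y then x else y) (x :: a')).1 ∨
        1 < (pvRun (if x ≤ y then x else y) (y :: b')).1 then
        [pvEntryStr (if x ≤ y then x else y) (pvRun (if x ≤ y then x else y) (x :: a')).1
          (pvRun (if x ≤ y then x else y) (y :: b')).1] else []) ++
      pvMerge (pvRun (if x ≤ y then x else y) (x :: a')).2 (pvRun (if x ≤ y then x else y) (y :: b')).2
termination_by a.length + b.length
decreasing_by
  · have := pvRun_rest_length_lt_cons x a'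
    simp [pvRun] at *; omega
  · have := pvRun_rest_length_lt_cons y b'
    simp [pvRun] at *; omega
  · by_cases h : x ≤ y
    · have h1 := pvRun_rest_length_lt_cons x a'
      have h2 := pvRun_rest_length_le x (y :: b')
      simp [h] at *; omega
    · have h1 := pvRun_rest_length_le y (x :: a')
      have h2 := pvRun_rest_length_lt_cons y b'
      simp [h] at *; omega

def mix2_alt (s1 : String) (s2 : String) : String :=
  let a := PySem.List.sorted (s1.toList.filter PySem.Chars.islower) (fun c => c) false
  let b := PySem.List.sorted (s2.toList.filter PySem.Chars.islower) (fun c => c) false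
  let entries := pvMerge a b
  String.ofList (PySem.Chars.join ['/']
    (PySem.List.sorted2 entries (fun s => -(s.length : Int)) (fun s => s) false))

-- ===== PRECONDITION & SPEC =====
def Spec_mix2 (s1 : String) (s2 : String) (out : String) : Prop := out = mix2_alt s1 s2
instance (s1 : String) (s2 : String) (out : String) : Decidable (Spec_mix2 s1 s2 out) := by unfold Spec_mix2; infer_instance

-- ===== CLAIM (what is proved, stated in full; the proofs are below) =====
def Claim_equal_mix2 : Prop := ∀ (s1 : String) (s2 : String), Dom_mix2 s1 s2 → Spec_mix2 s1 s2 (mix2 s1 s2)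

-- ===== LEMMAS AND PROOFS =====

-- the distinct letters in merge order: pvMerge's recursion skeleton keeping only the chosen char
def pvMergeKeys (a b : List Char) : List Char :=
  match a, b with
  | [], [] => []
  | x :: a', [] => x :: pvMergeKeys (pvRun x (x :: a')).2 (pvRun x ([] : List Char)).2
  | [], y :: b' => y :: pvMergeKeys (pvRun y ([] : List Char)).2 (pvRun y (y :: b')).2
  | x :: a', y :: b' =>
    (if x ≤ y then x else y) ::
      pvMergeKeys (pvRun (if x ≤ y then x else y) (x :: a')).2
        (pvRun (if x ≤ y then x else y) (y :: b')).2
termination_by a.length + b.length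
decreasing_by
  · have := pvRun_rest_length_lt_cons x a'
    simp [pvRun] at *; omega
  · have := pvRun_rest_length_lt_cons y b'
    simp [pvRun] at *; omega
  · by_cases h : x ≤ y
    · have h1 := pvRun_rest_length_lt_cons x a'
      have h2 := pvRun_rest_length_le x (y :: b')
      simp [h] at *; omega
    · have h1 := pvRun_rest_length_le y (x :: a')
      have h2 := pvRun_rest_length_lt_cons y b'
      simp [h] at *; omega

-- canonical emission: one entry per key whose max count exceeds 1, counts read off l1 / l2
def pvEmit (l1 l2 : List Char) (L : List Char) : List (List Char) :=
  L.filterMap (fun ch =>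
    if 1 < l1.count ch ∨ 1 < l2.count ch then
      some (pvEntryStr ch (l1.count ch) (l2.count ch)) else none)

theorem pvRun_eq_append (ch : Char) (l : List Char) :
    l = List.replicate (pvRun ch l).1 ch ++ (pvRun ch l).2 := by
  induction l with
  | nil => simp [pvRun]
  | cons x xs ih =>
    by_cases h : x = ch
    · subst h
      simp only [pvRun, reduceIte]
      rw [List.replicate_succ, List.cons_append]
      exact congrArg _ ih
    · simp [pvRun, h]

theorem pvRun_rest_sublist (ch : Char) (l : List Char) : (pvRun ch l).2.Sublist l := by
  conv_rhs => rw [pvRun_eq_append ch l]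
  exact List.sublist_append_right _ _

theorem pvRun_rest_not_mem (ch : Char) (l : List Char) (hs : l.Pairwise (· ≤ ·))
    (hlb : ∀ x ∈ l, ch ≤ x) : ch ∉ (pvRun ch l).2 := by
  induction l with
  | nil => simp [pvRun]
  | cons x xs ih =>
    by_cases h : x = ch
    · subst h
      simp only [pvRun, reduceIte]
      exact ih (List.pairwise_cons.1 hs).2 (fun z hz => hlb z (List.mem_cons_of_mem _ hz))
    · simp only [pvRun, if_neg h]
      intro hmem
      rcases List.mem_cons.1 hmem with h1 | h1
      · exact h h1.symm
      · have hx := (List.pairwise_cons.1 hs).1 ch h1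
        have hc := hlb x (List.mem_cons_self)
        exact h (le_antisymm hx hc)

theorem pvRun_fst_count (ch : Char) (l : List Char) (hs : l.Pairwise (· ≤ ·))
    (hlb : ∀ x ∈ l, ch ≤ x) : (pvRun ch l).1 = l.count ch := by
  conv_rhs => rw [pvRun_eq_append ch l]
  have := pvRun_rest_not_mem ch l hs hlb
  simp [List.count_append, List.count_eq_zero.2 this]

theorem pvRun_count_ne (ch ch' : Char) (l : List Char) (h : ch' ≠ ch) :
    (pvRun ch l).2.count ch' = l.count ch' := by
  conv_rhs => rw [pvRun_eq_append ch l]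
  simp only [List.count_append, List.count_replicate]
  simp [Ne.symm h]

theorem pvRun_mem_cases (ch : Char) (l : List Char) (z : Char) (hz : z ∈ l) :
    z = ch ∨ z ∈ (pvRun ch l).2 := by
  rw [pvRun_eq_append ch l] at hz
  rcases List.mem_append.1 hz with h | h
  · exact Or.inl (List.eq_of_mem_replicate h)
  · exact Or.inr h

theorem mem_pvMergeKeys (a b : List Char) (z : Char) :
    z ∈ pvMergeKeys a b ↔ z ∈ a ∨ z ∈ b := by
  induction a, b using pvMergeKeys.induct with
  | case1 => simp [pvMergeKeys]
  | case2 x a' ih =>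
    rw [pvMergeKeys, List.mem_cons, ih]
    constructor
    · rintro (rfl | hz | hz)
      · exact Or.inl List.mem_cons_self
      · exact Or.inl ((pvRun_rest_sublist x (x :: a')).mem hz)
      · simp [pvRun] at hz
    · rintro (hz | hz)
      · rcases pvRun_mem_cases x (x :: a') z hz with h | h
        · exact Or.inl h
        · exact Or.inr (Or.inl h)
      · simp at hz
  | case3 y b' ih =>
    rw [pvMergeKeys, List.mem_cons, ih]
    constructor
    · rintro (rfl | hz | hz)
      · exact Or.inr List.mem_cons_self
      · simp [pvRun] at hz
      · exact Or.inr ((pvRun_rest_sublist y (y :: b')).mem hz)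
    · rintro (hz | hz)
      · simp at hz
      · rcases pvRun_mem_cases y (y :: b') z hz with h | h
        · exact Or.inl h
        · exact Or.inr (Or.inr h)
  | case4 x a' y b' ih =>
    simp only [dite_eq_ite] at ih
    rw [pvMergeKeys, List.mem_cons, ih]
    constructor
    · rintro (rfl | hz | hz)
      · by_cases h : x ≤ y
        · exact Or.inl (by simp [h])
        · exact Or.inr (by simp [h])
      · exact Or.inl ((pvRun_rest_sublist _ (x :: a')).mem hz)
      · exact Or.inr ((pvRun_rest_sublist _ (y :: b')).mem hz)
    · rintro (hz | hz)
      · rcases pvRun_mem_cases (if x ≤ y then x else y) (x :: a') z hz with h | h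
        · exact Or.inl h
        · exact Or.inr (Or.inl h)
      · rcases pvRun_mem_cases (if x ≤ y then x else y) (y :: b') z hz with h | h
        · exact Or.inl h
        · exact Or.inr (Or.inr h)
theorem pvLb_of_sorted (x : Char) (l : List Char) (h : (x :: l).Pairwise (· ≤ ·)) :
    ∀ z ∈ x :: l, x ≤ z := by
  intro z hz
  rcases List.mem_cons.1 hz with rfl | hz
  · exact le_refl z
  · exact (List.pairwise_cons.1 h).1 z hz

theorem nodup_pvMergeKeys (a b : List Char) (ha : a.Pairwise (· ≤ ·))
    (hb : b.Pairwise (· ≤ ·)) : (pvMergeKeys a b).Nodup := by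
  induction a, b using pvMergeKeys.induct with
  | case1 => simp [pvMergeKeys]
  | case2 x a' ih =>
    rw [pvMergeKeys]
    have hs1 := ha.sublist (pvRun_rest_sublist x (x :: a'))
    refine List.nodup_cons.2 ⟨?_, ih hs1 (by simp [pvRun])⟩
    rw [mem_pvMergeKeys]
    rintro (h | h)
    · exact pvRun_rest_not_mem x (x :: a') ha (pvLb_of_sorted x a' ha) h
    · simp [pvRun] at h
  | case3 y b' ih =>
    rw [pvMergeKeys]
    have hs2 := hb.sublist (pvRun_rest_sublist y (y :: b'))
    refine List.nodup_cons.2 ⟨?_, ih (by simp [pvRun]) hs2⟩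
    rw [mem_pvMergeKeys]
    rintro (h | h)
    · simp [pvRun] at h
    · exact pvRun_rest_not_mem y (y :: b') hb (pvLb_of_sorted y b' hb) h
  | case4 x a' y b' ih =>
    simp only [dite_eq_ite] at ih
    rw [pvMergeKeys]
    have hlbx : ∀ z ∈ x :: a', (if x ≤ y then x else y) ≤ z := by
      intro z hz
      refine le_trans ?_ (pvLb_of_sorted x a' ha z hz)
      split <;> [exact le_refl x; exact le_of_not_ge (by assumption)]
    have hlby : ∀ z ∈ y :: b', (if x ≤ y then x else y) ≤ z := by
      intro z hz
      refine le_trans ?_ (pvLb_of_sorted y b' hb z hz)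
      split <;> [exact (by assumption); exact le_refl y]
    have hs1 := ha.sublist (pvRun_rest_sublist (if x ≤ y then x else y) (x :: a'))
    have hs2 := hb.sublist (pvRun_rest_sublist (if x ≤ y then x else y) (y :: b'))
    refine List.nodup_cons.2 ⟨?_, ih hs1 hs2⟩
    rw [mem_pvMergeKeys]
    rintro (h | h)
    · exact pvRun_rest_not_mem _ (x :: a') ha hlbx h
    · exact pvRun_rest_not_mem _ (y :: b') hb hlby h

theorem pvEmit_cons (a b : List Char) (ch : Char) (K : List Char) :
    pvEmit a b (ch :: K)
      = (if 1 < a.count ch ∨ 1 < b.count ch then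
          [pvEntryStr ch (a.count ch) (b.count ch)] else []) ++ pvEmit a b K := by
  by_cases h : 1 < a.count ch ∨ 1 < b.count ch <;>
    simp [pvEmit, h]

theorem pvEmit_shift (a b : List Char) (ch : Char) (K : List Char)
    (hK : ∀ z ∈ K, z ∈ (pvRun ch a).2 ∨ z ∈ (pvRun ch b).2)
    (hna : ch ∉ (pvRun ch a).2) (hnb : ch ∉ (pvRun ch b).2) :
    pvEmit a b K = pvEmit (pvRun ch a).2 (pvRun ch b).2 K := by
  refine List.filterMap_congr (fun z hz => ?_)
  have hne : z ≠ ch := by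
    rcases hK z hz with h | h
    · exact fun e => hna (e ▸ h)
    · exact fun e => hnb (e ▸ h)
  rw [pvRun_count_ne ch z a hne, pvRun_count_ne ch z b hne]

theorem pvMerge_eq_emit (a b : List Char) (ha : a.Pairwise (· ≤ ·))
    (hb : b.Pairwise (· ≤ ·)) : pvMerge a b = pvEmit a b (pvMergeKeys a b) := by
  induction a, b using pvMergeKeys.induct with
  | case1 => simp [pvMerge, pvEmit]
  | case2 x a' ih =>
    have hs1 := ha.sublist (pvRun_rest_sublist x (x :: a'))
    rw [pvMerge, pvMergeKeys, pvEmit_cons,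
      pvEmit_shift (x :: a') [] x _
        (fun z hz => (mem_pvMergeKeys _ _ z).1 hz)
        (pvRun_rest_not_mem x (x :: a') ha (pvLb_of_sorted x a' ha)) (by simp [pvRun]),
      ih hs1 (by simp [pvRun]),
      pvRun_fst_count x (x :: a') ha (pvLb_of_sorted x a' ha)]
    simp [pvRun]
  | case3 y b' ih =>
    have hs2 := hb.sublist (pvRun_rest_sublist y (y :: b'))
    rw [pvMerge, pvMergeKeys, pvEmit_cons,
      pvEmit_shift [] (y :: b') y _
        (fun z hz => (mem_pvMergeKeys _ _ z).1 hz)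
        (by simp [pvRun])
        (pvRun_rest_not_mem y (y :: b') hb (pvLb_of_sorted y b' hb)),
      ih (by simp [pvRun]) hs2,
      pvRun_fst_count y (y :: b') hb (pvLb_of_sorted y b' hb)]
    simp [pvRun]
  | case4 x a' y b' ih =>
    simp only [dite_eq_ite] at ih
    have hlbx : ∀ z ∈ x :: a', (if x ≤ y then x else y) ≤ z := by
      intro z hz
      refine le_trans ?_ (pvLb_of_sorted x a' ha z hz)
      split <;> [exact le_refl x; exact le_of_not_ge (by assumption)]
    have hlby : ∀ z ∈ y :: b', (if x ≤ y then x else y) ≤ z := by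
      intro z hz
      refine le_trans ?_ (pvLb_of_sorted y b' hb z hz)
      split <;> [exact (by assumption); exact le_refl y]
    have hs1 := ha.sublist (pvRun_rest_sublist (if x ≤ y then x else y) (x :: a'))
    have hs2 := hb.sublist (pvRun_rest_sublist (if x ≤ y then x else y) (y :: b'))
    rw [pvMerge, pvMergeKeys, pvEmit_cons,
      pvEmit_shift (x :: a') (y :: b') (if x ≤ y then x else y) _
        (fun z hz => (mem_pvMergeKeys _ _ z).1 hz)
        (pvRun_rest_not_mem _ (x :: a') ha hlbx)
        (pvRun_rest_not_mem _ (y :: b') hb hlby),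
      ih hs1 hs2,
      pvRun_fst_count _ (x :: a') ha hlbx,
      pvRun_fst_count _ (y :: b') hb hlby]
theorem pvFoldA (l1 l2 : List Char) (L : List Char) (acc : List (List Char × Char × Int)) :
    ((L.foldl (fun acc c =>
        let n1 := (PySem.Dict.counter l1).getD c 0
        let n2 := (PySem.Dict.counter l2).getD c 0
        if n1 > 1 ∨ n2 > 1 then
          acc ++ [if n1 > n2 then ((['1'] : List Char), c, n1) else if n2 > n1 then (['2'], c, n2)
                  else (['='], c, n1)]
        else acc) acc).map pvFmtA)
    = acc.map pvFmtA ++ pvEmit l1 l2 L := by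
  induction L generalizing acc with
  | nil => simp [pvEmit]
  | cons c L ih =>
    rw [List.foldl_cons, ih, pvEmit_cons]
    simp only [PySem.Dict.getD_counter]
    by_cases hc : 1 < l1.count c ∨ 1 < l2.count c
    · rw [if_pos (by exact_mod_cast (by omega : (1:Int) < l1.count c ∨ (1:Int) < l2.count c)),
        if_pos hc, List.map_append, List.append_assoc]
      congr 2
      rcases Nat.lt_trichotomy (l1.count c) (l2.count c) with h | h | h
      · rw [if_neg (by exact_mod_cast (by omega : ¬ ((l1.count c : Int) > l2.count c))),
          if_pos (by exact_mod_cast (by omega : ((l2.count c : Int) > l1.count c)))]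
        simp [pvFmtA, pvEntryStr, Nat.not_lt.2 h.le, h]
      · rw [if_neg (by omega : ¬ ((l1.count c : Int) > l2.count c)),
          if_neg (by omega : ¬ ((l2.count c : Int) > l1.count c))]
        simp [pvFmtA, pvEntryStr, h]
      · rw [if_pos (by exact_mod_cast (by omega : ((l1.count c : Int) > l2.count c)))]
        simp [pvFmtA, pvEntryStr, h]
    · rw [if_neg (by exact_mod_cast (by omega : ¬ ((1:Int) < l1.count c ∨ (1:Int) < l2.count c))),
        if_neg hc, List.nil_append]
theorem sorted2_toLex {A K1 K2 : Type} [LinearOrder K1] [LinearOrder K2] (xs : List A)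
    (k1 : A → K1) (k2 : A → K2) :
    PySem.List.sorted2 xs k1 k2 false
      = PySem.List.sorted xs (fun x => toLex (k1 x, k2 x)) false := by
  unfold PySem.List.sorted2 PySem.List.sorted
  simp only [Bool.false_eq_true, if_false]
  congr 1
  funext acc p
  congr 1
  funext a b
  rcases lt_trichotomy (k1 a) (k1 b) with h | h | h
  · simp [Prod.Lex.lt_iff, h, asymm h]
  · simp [Prod.Lex.lt_iff, h]
  · simp [Prod.Lex.lt_iff, h, asymm h]
    exact fun e => absurd e.symm (ne_of_gt h).symm

theorem pvKeyInj2 : Function.Injective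
    (fun s : List Char => toLex ((-(s.length : Int)), s)) := by
  intro a b h
  simpa using congrArg (fun p => (ofLex p).2) h
theorem sorted2_eq_of_perm (xs ys : List (List Char)) (h : xs.Perm ys) :
    PySem.List.sorted2 xs (fun s => -(s.length : Int)) (fun s => s) false
      = PySem.List.sorted2 ys (fun s => -(s.length : Int)) (fun s => s) false := by
  have hx : PySem.List.sorted2 xs (fun s => -(s.length : Int)) (fun s => s) false
      = @PySem.List.sorted2 (List Char) Int (List Char)
          Int.instLinearOrder.toLT Int.instLinearOrder.toDecidableLT
          List.instLinearOrder.toLT List.instLinearOrder.toDecidableLT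
          xs (fun s => -(s.length : Int)) (fun s => s) false := by congr 1
  have hy : PySem.List.sorted2 ys (fun s => -(s.length : Int)) (fun s => s) false
      = @PySem.List.sorted2 (List Char) Int (List Char)
          Int.instLinearOrder.toLT Int.instLinearOrder.toDecidableLT
          List.instLinearOrder.toLT List.instLinearOrder.toDecidableLT
          ys (fun s => -(s.length : Int)) (fun s => s) false := by congr 1
  rw [hx, hy, sorted2_toLex, sorted2_toLex]
  exact PySem.List.sorted_eq_sorted_of_perm _ _ _ pvKeyInj2 h

set_option maxHeartbeats 1000000 in
theorem pvMain (s1 s2 : String) : mix2 s1 s2 = mix2_alt s1 s2 := by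
  simp only [mix2, mix2_alt]
  have hnd : ((PySem.Dict.counter (s2.toList.filter PySem.Chars.islower)).items.foldl
      (fun d p => d.modify p.1 0 (fun v => v + p.2))
      (PySem.Dict.counter (s1.toList.filter PySem.Chars.islower))).keys.Nodup :=
    PySem.Dict.nodup_keys_foldl_modify_key _ _ _ _ _ (PySem.Dict.nodup_keys_counter _)
  have hK : ((PySem.Dict.counter (s2.toList.filter PySem.Chars.islower)).items.foldl
      (fun d p => d.modify p.1 0 (fun v => v + p.2))
      (PySem.Dict.counter (s1.toList.filter PySem.Chars.islower))).keys
      = PySem.Set.union (PySem.Set.ofList (s1.toList.filter PySem.Chars.islower))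
                        (PySem.Set.ofList (s2.toList.filter PySem.Chars.islower)) := by
    rw [PySem.Dict.keys_foldl_modify_key
      (PySem.Dict.counter (s2.toList.filter PySem.Chars.islower)).items
      (fun p => p.1) 0 (fun d p v => v + p.2)
      (PySem.Dict.counter (s1.toList.filter PySem.Chars.islower))]
    have hkeys : (PySem.Dict.counter (s2.toList.filter PySem.Chars.islower)).items.map
        (fun p => p.1) = (PySem.Dict.counter (s2.toList.filter PySem.Chars.islower)).keys := rfl
    rw [hkeys, PySem.Dict.keys_counter, PySem.Dict.keys_counter]
    rfl
  rw [PySem.Set.ofList_eq_self_of_nodup _ hnd, hK,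
    pvFoldA (s1.toList.filter PySem.Chars.islower) (s2.toList.filter PySem.Chars.islower) _ []]
  have hsa : (PySem.List.sorted (s1.toList.filter PySem.Chars.islower) (fun c => c) false).Pairwise
      (· ≤ ·) := by
    simpa using PySem.List.sorted_pairwise (s1.toList.filter PySem.Chars.islower) (fun c => c)
  have hsb : (PySem.List.sorted (s2.toList.filter PySem.Chars.islower) (fun c => c) false).Pairwise
      (· ≤ ·) := by
    simpa using PySem.List.sorted_pairwise (s2.toList.filter PySem.Chars.islower) (fun c => c)
  rw [pvMerge_eq_emit _ _ hsa hsb]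
  have hcnt : pvEmit (PySem.List.sorted (s1.toList.filter PySem.Chars.islower) (fun c => c) false)
      (PySem.List.sorted (s2.toList.filter PySem.Chars.islower) (fun c => c) false)
      (pvMergeKeys (PySem.List.sorted (s1.toList.filter PySem.Chars.islower) (fun c => c) false)
        (PySem.List.sorted (s2.toList.filter PySem.Chars.islower) (fun c => c) false))
      = pvEmit (s1.toList.filter PySem.Chars.islower) (s2.toList.filter PySem.Chars.islower)
        (pvMergeKeys (PySem.List.sorted (s1.toList.filter PySem.Chars.islower) (fun c => c) false)
          (PySem.List.sorted (s2.toList.filter PySem.Chars.islower) (fun c => c) false)) := by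
    refine List.filterMap_congr (fun z _ => ?_)
    rw [(PySem.List.sorted_perm (s1.toList.filter PySem.Chars.islower) (fun c => c) false).count_eq,
      (PySem.List.sorted_perm (s2.toList.filter PySem.Chars.islower) (fun c => c) false).count_eq]
  rw [hcnt]
  have hperm : (PySem.Set.union (PySem.Set.ofList (s1.toList.filter PySem.Chars.islower))
      (PySem.Set.ofList (s2.toList.filter PySem.Chars.islower))).Perm
      (pvMergeKeys (PySem.List.sorted (s1.toList.filter PySem.Chars.islower) (fun c => c) false)
        (PySem.List.sorted (s2.toList.filter PySem.Chars.islower) (fun c => c) false)) := by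
    refine (List.perm_ext_iff_of_nodup
      (PySem.Set.nodup_union _ _ (PySem.Set.nodup_ofList _))
      (nodup_pvMergeKeys _ _ hsa hsb)).2 (fun z => ?_)
    rw [PySem.Set.mem_union, PySem.Set.mem_ofList, PySem.Set.mem_ofList, mem_pvMergeKeys,
      (PySem.List.sorted_perm (s1.toList.filter PySem.Chars.islower) (fun c => c) false).mem_iff,
      (PySem.List.sorted_perm (s2.toList.filter PySem.Chars.islower) (fun c => c) false).mem_iff]
  have hE : (pvEmit (s1.toList.filter PySem.Chars.islower) (s2.toList.filter PySem.Chars.islower)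
      (PySem.Set.union (PySem.Set.ofList (s1.toList.filter PySem.Chars.islower))
        (PySem.Set.ofList (s2.toList.filter PySem.Chars.islower)))).Perm
      (pvEmit (s1.toList.filter PySem.Chars.islower) (s2.toList.filter PySem.Chars.islower)
        (pvMergeKeys
          (PySem.List.sorted (s1.toList.filter PySem.Chars.islower) (fun c => c) false)
          (PySem.List.sorted (s2.toList.filter PySem.Chars.islower) (fun c => c) false))) :=
    hperm.filterMap _
  simp only [List.map_nil, List.nil_append]
  rw [sorted2_eq_of_perm _ _ hE]

-- ===== VERDICT (by name: the statement is the Claim_ definition above) =====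
theorem mix2_spec : Claim_equal_mix2 := by
  intro s1 s2 _
  exact pvMain s1 s2
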